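-- pv_equiv track=rewrite | github.com/mattboran/PythonIdentifier | Identifier.py | get_first_letters
-- ===== SOURCE A (Python) =====
-- def get_first_letters(chars):
-- 	'''
-- 		This function returns a charstream containing the first letter of every word in 'chars'
-- 	'''
--
-- 	firstchars = []
-- 	text = ''.join(chars).lower()
--
-- 	for line in text.splitlines():
-- 		for word in line.split():
-- 			if(word[0] != '' or word[0] != ' ') and (word[0].isalpha()):
-- 				firstchars.append(word[0])
-- 	return firstchars
-- ===== SOURCE B (Python) =====
-- def get_first_letters(chars):
--     '''Single state-machine pass over the text instead of splitlines()/split() tokenization.'''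
--     text = ''.join(chars).lower()
--     firstchars = []
--     prev_ws = True
--     for c in text:
--         if prev_ws and not c.isspace() and c.isalpha():
--             firstchars.append(c)
--         prev_ws = c.isspace()
--     return firstchars
-- ===== Notes on version B (the rewrite author's own statement) =====
-- stated objective: simpler
-- what changed: Replaces A's join/splitlines/split nested tokenization with a single character-by-character state-machine pass that appends a character exactly at alphabetic word starts (previous char was whitespace).
import Mathlib
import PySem

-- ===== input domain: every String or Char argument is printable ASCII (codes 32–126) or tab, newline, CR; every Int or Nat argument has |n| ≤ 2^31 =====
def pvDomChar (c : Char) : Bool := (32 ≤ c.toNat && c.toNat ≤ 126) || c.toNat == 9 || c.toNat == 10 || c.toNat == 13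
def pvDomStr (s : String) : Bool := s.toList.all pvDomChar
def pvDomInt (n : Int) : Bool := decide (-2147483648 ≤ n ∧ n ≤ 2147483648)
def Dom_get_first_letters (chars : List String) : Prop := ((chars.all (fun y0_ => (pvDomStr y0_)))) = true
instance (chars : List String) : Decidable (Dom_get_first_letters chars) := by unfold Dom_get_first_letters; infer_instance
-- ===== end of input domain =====

-- B replaces A's splitlines()/split() tokenization by one state-machine pass over the text (objective: simpler one-pass scan).

-- ===== PORT A =====
def get_first_letters (chars : List String) : List String :=
  let text := PySem.Chars.lower (PySem.Chars.join [] (chars.map String.toList))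
  (PySem.Chars.splitlines text).foldl (fun fc line =>
    (PySem.Chars.split₀ line).foldl (fun fc word =>
      match PySem.List.pyGet? word 0 with
      | some c =>
          if (decide ([c] ≠ ([] : List Char)) || decide ([c] ≠ [' '])) && PySem.Chars.isalpha c
          then fc ++ [String.ofList [c]] else fc
      | none => fc   -- unreachable: split() only yields nonempty words, so word[0] never raises
      ) fc) []

-- ===== PORT B =====
def get_first_letters_alt (chars : List String) : List String :=
  let text := PySem.Chars.lower (PySem.Chars.join [] (chars.map String.toList))
  (text.foldl (fun s c =>
      ((if s.2 && !PySem.Chars.isspace c && PySem.Chars.isalpha c then s.1 ++ [String.ofList [c]] else s.1),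
       PySem.Chars.isspace c))
    (([] : List String), true)).1

-- ===== PRECONDITION & SPEC =====
def Spec_get_first_letters (chars : List String) (out : List String) : Prop := out = get_first_letters_alt chars
instance (chars : List String) (out : List String) : Decidable (Spec_get_first_letters chars out) := by unfold Spec_get_first_letters; infer_instance

-- ===== CLAIM (what is proved, stated in full; the proofs are below) =====
def Claim_equal_get_first_letters : Prop := ∀ (chars : List String), Dom_get_first_letters chars → Spec_get_first_letters chars (get_first_letters chars)

-- ===== LEMMAS AND PROOFS =====

-- first letter of a word, kept iff alphabetic
def pvPick (w : List Char) : List String :=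
  match w with
  | [] => []
  | c :: _ => if PySem.Chars.isalpha c then [String.ofList [c]] else []

-- reference function: first letters of the words of cs, given whether the previous char was whitespace
def pvFirsts : List Char → Bool → List String
  | [], _ => []
  | c :: rest, p =>
      (if p && !PySem.Chars.isspace c && PySem.Chars.isalpha c then [String.ofList [c]] else [])
        ++ pvFirsts rest (PySem.Chars.isspace c)

-- whitespace-state after scanning l starting from p
def pvLastWs : List Char → Bool → Bool
  | [], p => p
  | c :: rest, _ => pvLastWs rest (PySem.Chars.isspace c)

-- whitespace-state encoded by split/splitlines current-word buffer (stored reversed)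
def pvPrev : List Char → Bool
  | [] => true
  | c :: _ => PySem.Chars.isspace c

theorem pvFirsts_append (l1 l2 : List Char) (p : Bool) :
    pvFirsts (l1 ++ l2) p = pvFirsts l1 p ++ pvFirsts l2 (pvLastWs l1 p) := by
  induction l1 generalizing p with
  | nil => rfl
  | cons c t ih => simp [pvFirsts, pvLastWs, ih]

theorem pvLastWs_reverse (cur : List Char) :
    pvLastWs cur.reverse true = pvPrev cur := by
  cases cur with
  | nil => simp [pvLastWs, pvPrev]
  | cons c t =>
    have h : ∀ (m : List Char) (q : Bool), pvLastWs (m ++ [c]) q = PySem.Chars.isspace c := by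
      intro m; induction m with
      | nil => intro q; rfl
      | cons d s ih => intro q; simp [pvLastWs, ih]
    simp [pvPrev, List.reverse_cons, h]

theorem pvPick_append_of_ne (l m : List Char) (h : l ≠ []) : pvPick (l ++ m) = pvPick l := by
  cases l with
  | nil => exact absurd rfl h
  | cons c t => rfl

theorem pvB_invariant (cs : List Char) (acc : List String) (p : Bool) :
    (cs.foldl (fun s c =>
      ((if s.2 && !PySem.Chars.isspace c && PySem.Chars.isalpha c then s.1 ++ [String.ofList [c]] else s.1),
       PySem.Chars.isspace c)) (acc, p)).1 = acc ++ pvFirsts cs p := by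
  induction cs generalizing acc p with
  | nil => simp [pvFirsts]
  | cons c t ih =>
    simp only [List.foldl_cons]
    rw [ih]
    by_cases h : (p && !PySem.Chars.isspace c && PySem.Chars.isalpha c) = true <;>
      simp [pvFirsts, h]

theorem pvSplit_invariant (cs cur : List Char) (acc : List (List Char)) :
    (PySem.Chars.split₀.go cs cur acc).flatMap pvPick
      = acc.reverse.flatMap pvPick ++ pvPick cur.reverse ++ pvFirsts cs cur.isEmpty := by
  fun_induction PySem.Chars.split₀.go cs cur acc with
  | case1 cur acc h =>
      rw [List.isEmpty_iff] at h; subst h; simp [pvPick, pvFirsts]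
  | case2 cur acc h =>
      simp [pvFirsts]
  | case3 c rest cur acc hsp hemp ih =>
      rw [List.isEmpty_iff] at hemp; subst hemp
      simpa [pvPick, pvFirsts, hsp] using ih
  | case4 c rest cur acc hsp hemp ih =>
      rw [ih]
      rw [Bool.not_eq_true] at hemp
      simp [pvPick, pvFirsts, hsp, hemp]
  | case5 c rest cur acc hsp ih =>
      rw [ih]
      cases cur with
      | nil => simp [pvPick, pvFirsts, hsp]
      | cons d t =>
          have hne : t.reverse ++ [d] ≠ [] := by simp
          simp only [List.reverse_cons]
          rw [pvPick_append_of_ne _ _ hne]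
          simp [pvFirsts, hsp]

theorem pvSplitlines_invariant (isB : Char → Bool) (hB : ∀ c, isB c = true → PySem.Chars.isspace c = true)
    (cs cur : List Char) (acc : List (List Char)) :
    (PySem.Chars.splitlines.go isB cs cur acc).flatMap (fun line => pvFirsts line true)
      = acc.reverse.flatMap (fun line => pvFirsts line true)
          ++ pvFirsts cur.reverse true ++ pvFirsts cs (pvPrev cur) := by
  have hr : PySem.Chars.isspace '\r' = true := by decide
  have hn : PySem.Chars.isspace '\n' = true := by decide
  fun_induction PySem.Chars.splitlines.go isB cs cur acc with
  | case1 cur acc h =>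
      rw [List.isEmpty_iff] at h; subst h; simp [pvFirsts]
  | case2 cur acc h =>
      simp [pvFirsts]
  | case3 rest cur acc ih =>
      rw [ih]
      simp [pvFirsts, pvPrev, hr, hn]
  | case4 c rest cur acc hno hB' ih =>
      rw [ih]
      have hs : PySem.Chars.isspace c = true := hB c hB'
      simp [pvFirsts, pvPrev, hs]
  | case5 c rest cur acc hno hB' ih =>
      rw [ih, List.reverse_cons, pvFirsts_append, pvLastWs_reverse]
      simp only [pvPrev, pvFirsts, List.append_nil, List.append_assoc]

theorem pv_stepA (fc : List String) (w : List Char) :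
    (match PySem.List.pyGet? w 0 with
     | some c =>
         if (decide ([c] ≠ ([] : List Char)) || decide ([c] ≠ [' '])) && PySem.Chars.isalpha c
         then fc ++ [String.ofList [c]] else fc
     | none => fc) = fc ++ pvPick w := by
  cases w with
  | nil => simp [PySem.List.pyGet?, pvPick]
  | cons c t => by_cases h : PySem.Chars.isalpha c = true <;>
      simp [PySem.List.pyGet?, PySem.List.pyIdx?, pvPick, h]

theorem pv_line (line : List Char) :
    (PySem.Chars.split₀ line).flatMap pvPick = pvFirsts line true := by
  have h := pvSplit_invariant line [] []
  simpa [PySem.Chars.split₀, pvPick] using h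

-- ===== VERDICT (by name: the statement is the Claim_ definition above) =====
theorem get_first_letters_spec : Claim_equal_get_first_letters := by
  unfold Claim_equal_get_first_letters
  intro chars _
  unfold Spec_get_first_letters get_first_letters get_first_letters_alt
  rw [pvB_invariant]
  simp only [pv_stepA, PySem.List.foldl_append_eq_flatMap, pv_line]
  simp only [PySem.Chars.splitlines]
  rw [pvSplitlines_invariant _ (by
        intro c h
        simp only [Bool.or_eq_true, decide_eq_true_eq] at h
        simp only [PySem.Chars.isspace, Bool.or_eq_true, Bool.and_eq_true, decide_eq_true_eq]
        omega)]
  simp [pvFirsts, pvPrev]
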